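-- pv_equiv track=rewrite | github.com/juantoniolloretegea/SV-banco-de-idiomas | laboratorio/transductor_horizonte_nlp_sv.py | bloques_u
-- ===== SOURCE A (Python) =====
-- from typing import Dict, List, Set
--
-- U = "U"
--
-- def bloques_u(vector: List[object]) -> int:
--     z = [1 if value == U else 0 for value in vector]
--     if not any(z):
--         return 0
--     if all(z):
--         return 1
--     count = 0
--     for i in range(len(z)):
--         if z[i] == 1 and z[i - 1] == 0:
--             count += 1
--     return count
-- ===== SOURCE B (Python) =====
-- U = "U"
--
-- def bloques_u(vector):
--     # Compress the vector into a list of run keys (True = run of U), then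
--     # count the True runs and merge the first/last runs at the circular seam.
--     keys = []
--     for value in vector:
--         k = (value == U)
--         if not keys or keys[-1] != k:
--             keys.append(k)
--     count = sum(keys)
--     if len(keys) > 1 and keys[0] and keys[-1]:
--         count -= 1
--     return count
-- ===== Notes on version B (the rewrite author's own statement) =====
-- stated objective: alternative
-- what changed: B run-length-compresses the vector into a list of group keys (itertools.groupby style), counts the U-groups, and merges the circular seam with a single correction, instead of A's 0/1 indicator vector with any/all prepasses and an index loop testing z[i]==1 and z[i-1]==0 with negative-index wrap-around.
import Mathlib
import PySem

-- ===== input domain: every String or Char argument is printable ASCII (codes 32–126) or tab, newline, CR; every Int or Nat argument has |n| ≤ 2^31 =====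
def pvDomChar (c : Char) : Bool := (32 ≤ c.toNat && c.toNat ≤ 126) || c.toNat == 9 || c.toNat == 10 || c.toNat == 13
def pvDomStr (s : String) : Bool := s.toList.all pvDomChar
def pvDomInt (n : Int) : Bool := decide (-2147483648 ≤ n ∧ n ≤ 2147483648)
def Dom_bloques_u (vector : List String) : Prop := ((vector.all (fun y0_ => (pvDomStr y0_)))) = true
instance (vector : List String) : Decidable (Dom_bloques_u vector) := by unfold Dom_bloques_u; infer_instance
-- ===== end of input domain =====

-- B counts circular U-runs by run-length-compressing the vector into group keys and
-- applying a seam correction, instead of A's index scan with wrap-around lookups (objective: alternative).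

-- ===== PORT A =====
-- In the counting loop z is nonempty and every index i satisfies -1 ≤ i-1 < len(z),
-- so Python's z[i]/z[i-1] never raises; pyGetD with default 0 is exact there.
def bloques_u (vector : List String) : Int :=
  let z : List Int := vector.map (fun value => if value == "U" then 1 else 0)
  if !(z.any (fun x => x != 0)) then 0
  else if z.all (fun x => x != 0) then 1
  else
    (PySem.List.pyRange 0 (z.length : Int) 1).foldl
      (fun count i =>
        if PySem.List.pyGetD z i 0 == 1 && PySem.List.pyGetD z (i - 1) 0 == 0
        then count + 1 else count) 0

-- ===== PORT B =====
def bloques_u_alt (vector : List String) : Int :=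
  let keys : List Bool := vector.foldl
    (fun keys value =>
      let k := value == "U"
      if keys = [] ∨ keys.getLast? ≠ some k then keys ++ [k] else keys) []
  let count : Int := (keys.map (fun k => if k then (1 : Int) else 0)).sum
  if keys.length > 1 ∧ keys.headD false = true ∧ keys.getLastD false = true then count - 1
  else count

-- ===== PRECONDITION & SPEC =====
def Spec_bloques_u (vector : List String) (out : Int) : Prop := out = bloques_u_alt vector
instance (vector : List String) (out : Int) : Decidable (Spec_bloques_u vector out) := by unfold Spec_bloques_u; infer_instance

-- ===== CLAIM (what is proved, stated in full; the proofs are below) =====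
def Claim_equal_bloques_u : Prop := ∀ (vector : List String), Dom_bloques_u vector → Spec_bloques_u vector (bloques_u vector)

-- ===== LEMMAS AND PROOFS =====

-- run-length compression of a Bool list (previous key as state)
def pvRle (p : Option Bool) : List Bool → List Bool
  | [] => []
  | c :: rest => if p = some c then pvRle p rest else c :: pvRle (some c) rest

-- number of rises ¬prev→cur, scanning with previous value p
def pvRise (p : Bool) : List Bool → Int
  | [] => 0
  | c :: rest => (if c && !p then 1 else 0) + pvRise c rest

def pvInd (k : Bool) : Int := if k then 1 else 0

-- B's fold builds exactly acc ++ pvRle acc.getLast? b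
theorem pvRle_cons_eq (p : Bool) (rest : List Bool) :
    pvRle (some p) (p :: rest) = pvRle (some p) rest := by simp [pvRle]

theorem pvRle_cons_ne (q : Option Bool) (c : Bool) (rest : List Bool) (h : q ≠ some c) :
    pvRle q (c :: rest) = c :: pvRle (some c) rest := by
  simp only [pvRle, if_neg h]

theorem pvFold_eq_rle (b : List Bool) : ∀ acc : List Bool,
    b.foldl (fun keys k => if keys = [] ∨ keys.getLast? ≠ some k then keys ++ [k] else keys) acc
      = acc ++ pvRle acc.getLast? b := by
  induction b with
  | nil => intro acc; simp [pvRle]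
  | cons c rest ih =>
    intro acc
    rw [List.foldl_cons]
    by_cases h : acc.getLast? = some c
    · have hacc : acc ≠ [] := by rintro rfl; simp at h
      have hcond : ¬ (acc = [] ∨ acc.getLast? ≠ some c) :=
        fun hor => hor.elim (fun he => hacc he) (fun hne => hne h)
      rw [if_neg hcond, ih acc]
      obtain ⟨p, hp⟩ : ∃ p, acc.getLast? = some p := ⟨c, h⟩
      have hpc : p = c := by rw [hp] at h; exact (Option.some.injEq _ _ ▸ h :)
      subst hpc
      rw [hp, pvRle_cons_eq]
    · have hcond : (acc = [] ∨ acc.getLast? ≠ some c) := Or.inr h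
      rw [if_pos hcond, ih (acc ++ [c])]
      rw [List.getLast?_concat, pvRle_cons_ne _ _ _ h]
      simp

theorem pvRle_trues (b : List Bool) : ∀ p : Bool,
    ((pvRle (some p) b).map pvInd).sum = pvRise p b := by
  induction b with
  | nil => intro p; simp [pvRle, pvRise]
  | cons c rest ih =>
    intro p
    by_cases h : p = c
    · subst h
      rw [pvRle_cons_eq, ih p]
      simp [pvRise]
    · rw [pvRle_cons_ne _ _ _ (by simp [h]), List.map_cons, List.sum_cons, ih c]
      simp only [pvRise]
      cases c <;> cases p <;> simp [pvInd] at h ⊢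

theorem pvRle_none_trues (b : List Bool) :
    ((pvRle none b).map pvInd).sum = pvRise false b := by
  cases b with
  | nil => simp [pvRle, pvRise]
  | cons c rest =>
    rw [pvRle_cons_ne _ _ _ (by simp), List.map_cons, List.sum_cons, pvRle_trues rest c]
    simp only [pvRise]
    cases c <;> simp [pvInd]

theorem pvRle_lastD (b : List Bool) : ∀ p : Bool,
    (pvRle (some p) b).getLastD p = b.getLastD p := by
  induction b with
  | nil => intro p; simp [pvRle]
  | cons c rest ih =>
    intro p
    by_cases h : p = c
    · subst h
      rw [pvRle_cons_eq, ih p, List.getLastD_cons]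
    · rw [pvRle_cons_ne _ _ _ (by simp [h]), List.getLastD_cons, List.getLastD_cons, ih c]

theorem pvRle_none_lastD (b : List Bool) (d : Bool) :
    (pvRle none b).getLastD d = b.getLastD d := by
  cases b with
  | nil => simp [pvRle]
  | cons c rest =>
    rw [pvRle_cons_ne _ _ _ (by simp), List.getLastD_cons, List.getLastD_cons, pvRle_lastD]

theorem pvRle_eq_nil_of_all (b : List Bool) : ∀ p : Bool, (∀ x ∈ b, x = p) → pvRle (some p) b = [] := by
  induction b with
  | nil => intro p _; simp [pvRle]
  | cons c rest ih =>
    intro p h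
    have hc : c = p := h c (by simp)
    subst hc
    rw [pvRle_cons_eq]
    exact ih c (fun x hx => h x (by simp [hx]))

theorem pvRle_nil_all (b : List Bool) : ∀ p : Bool, pvRle (some p) b = [] → ∀ x ∈ b, x = p := by
  induction b with
  | nil => intro p _ x hx; simp at hx
  | cons c rest ih =>
    intro p h x hx
    by_cases hc : p = c
    · subst hc
      rw [pvRle_cons_eq] at h
      rcases List.mem_cons.1 hx with rfl | hx
      · rfl
      · exact ih p h x hx
    · rw [pvRle_cons_ne _ _ _ (by simp [hc])] at h
      exact absurd h (by simp)

theorem pvRise_zero (b : List Bool) : ∀ p : Bool, (∀ x ∈ b, x = false) → pvRise p b = 0 := by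
  induction b with
  | nil => intro p _; simp [pvRise]
  | cons c rest ih =>
    intro p h
    have hc : c = false := h c (by simp)
    subst hc
    simp [pvRise, ih false (fun x hx => h x (by simp [hx]))]

theorem pvRise_seam (c : Bool) (rest : List Bool) (p : Bool) :
    pvRise p (c :: rest) = pvRise false (c :: rest) - (if c && p then 1 else 0) := by
  simp only [pvRise]
  cases c <;> cases p <;> simp

-- the A-side counting loop as countP, then as pvRise
theorem pvLastD_eq_getLast (l : List Bool) (d : Bool) (h : l ≠ []) : l.getLastD d = l.getLast h := by
  rw [List.getLastD_eq_getLast?, List.getLast?_eq_some_getLast h]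
  rfl

theorem pvA_core (suf : List Bool) : ∀ pre : List Bool, pre ≠ [] →
    ((PySem.List.pyRange (pre.length : Int) ((pre.length + suf.length : Nat) : Int) 1).countP
      (fun i => PySem.List.pyGetD ((pre ++ suf).map pvInd) i 0 == 1
        && PySem.List.pyGetD ((pre ++ suf).map pvInd) (i - 1) 0 == 0) : Int)
      = pvRise (pre.getLastD false) suf := by
  induction suf with
  | nil =>
    intro pre hpre
    rw [PySem.List.pyRange_one_eq_nil (by simp)]
    simp [pvRise]
  | cons c rest ih =>
    intro pre hpre
    have hprelen : 0 < pre.length := List.length_pos_iff.2 hpre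
    have hlen : (pre.length : Int) < ((pre.length + (c :: rest).length : Nat) : Int) := by
      simp only [List.length_cons]; omega
    rw [PySem.List.pyRange_one_cons hlen, List.countP_cons]
    have hj : PySem.List.pyGetD ((pre ++ c :: rest).map pvInd) (pre.length : Int) 0 = pvInd c := by
      rw [PySem.List.pyGetD_eq_getElem _ _ (by positivity)
        (by simp only [List.length_map, List.length_append, List.length_cons]; omega)]
      simp only [Int.toNat_natCast, List.map_append]
      rw [List.getElem_append_right (by simp)]
      simp
    have hj1 : PySem.List.pyGetD ((pre ++ c :: rest).map pvInd) ((pre.length : Int) - 1) 0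
        = pvInd (pre.getLastD false) := by
      have h1 : ((pre.length : Int) - 1) = ((pre.length - 1 : Nat) : Int) := by omega
      rw [h1, PySem.List.pyGetD_eq_getElem _ _ (by positivity)
        (by simp only [List.length_map, List.length_append, List.length_cons]; omega)]
      simp only [Int.toNat_natCast, List.map_append]
      have hlt : pre.length - 1 < pre.length := by omega
      rw [List.getElem_append_left (by simpa using hlt), List.getElem_map]
      rw [pvLastD_eq_getLast pre false hpre, List.getLast_eq_getElem hpre]
    have hstep : ((pre.length : Int) + 1) = (((pre ++ [c]).length : Nat) : Int) := by
      simp only [List.length_append, List.length_cons, List.length_nil]; omega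
    have hrest : pre ++ c :: rest = (pre ++ [c]) ++ rest := by simp
    have hn : ((pre.length + (c :: rest).length : Nat) : Int)
        = (((pre ++ [c]).length + rest.length : Nat) : Int) := by
      simp only [List.length_append, List.length_cons, List.length_nil]; omega
    rw [hj, hj1, hstep, hn, hrest]
    rw [Nat.cast_add (List.countP _ _) _]
    rw [ih (pre ++ [c]) (by simp)]
    rw [(List.getLastD_concat : (pre ++ [c]).getLastD false = c)]
    simp only [pvRise]
    cases c <;> cases hp : pre.getLastD false <;> simp [pvInd] <;> push_cast <;> ring

-- evaluate pvInd equalities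
theorem pvInd_eq_one (c : Bool) : (pvInd c == 1) = c := by cases c <;> decide
theorem pvInd_eq_zero (c : Bool) : (pvInd c == 0) = !c := by cases c <;> decide

-- A's counting branch equals pvRise (last) b
theorem pvA_count (b : List Bool) (hb : b ≠ []) :
    (PySem.List.pyRange 0 ((b.map pvInd).length : Int) 1).foldl
      (fun count i =>
        if PySem.List.pyGetD (b.map pvInd) i 0 == 1 && PySem.List.pyGetD (b.map pvInd) (i - 1) 0 == 0
        then count + 1 else count) 0
      = pvRise (b.getLastD false) b := by
  rw [PySem.List.foldl_count_if]
  obtain ⟨c, rest, rfl⟩ := List.exists_cons_of_ne_nil hb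
  have h0 : (0 : Int) < (((c :: rest).map pvInd).length : Int) := by
    simp only [List.length_map, List.length_cons]; omega
  rw [PySem.List.pyRange_one_cons h0, List.countP_cons]
  have hz0 : PySem.List.pyGetD ((c :: rest).map pvInd) 0 0 = pvInd c := by
    simp [PySem.List.pyGetD_zero_cons]
  have hzm1 : PySem.List.pyGetD ((c :: rest).map pvInd) (0 - 1) 0
      = pvInd ((c :: rest).getLastD false) := by
    have hne : ((c :: rest).map pvInd) ≠ [] := by simp
    rw [show ((0 : Int) - 1) = -1 by ring, PySem.List.pyGetD_neg_one _ _ hne]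
    rw [List.getLast_map hne]
    rw [pvLastD_eq_getLast _ false (by simp : (c :: rest) ≠ [])]
  have hcore := pvA_core rest [c] (by simp)
  have hlen : (((c :: rest).map pvInd).length : Int) = (([c].length + rest.length : Nat) : Int) := by
    simp only [List.length_map, List.length_cons, List.length_nil]; omega
  rw [hz0, hzm1, hlen]
  rw [show ((([c] : List Bool).length : Int)) = (1 : Int) by simp] at hcore
  rw [show ([c] : List Bool) ++ rest = c :: rest by simp] at hcore
  rw [show (0 : Int) + 1 = 1 by ring, Nat.cast_add (List.countP _ _) _, hcore]
  rw [show ([c] : List Bool).getLastD false = c from rfl]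
  simp only [List.getLastD_cons, pvRise, pvInd_eq_one, pvInd_eq_zero]
  push_cast
  ring

-- heads / booleans
theorem pvRle_none_headD (b : List Bool) (d : Bool) :
    (pvRle none b).headD d = b.headD d := by
  cases b with
  | nil => rfl
  | cons c rest => rw [pvRle_cons_ne _ _ _ (by simp)]; rfl

theorem pvAny_map (b : List Bool) : ((b.map pvInd).any (fun x => x != 0)) = b.any id := by
  rw [List.any_map]; congr 1; funext k; cases k <;> rfl

theorem pvAll_map (b : List Bool) : ((b.map pvInd).all (fun x => x != 0)) = b.all id := by
  rw [List.all_map]; congr 1; funext k; cases k <;> rfl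

-- B's fold over the strings is the fold over the Bool keys
theorem pvFoldStr (vector : List String) : ∀ acc : List Bool,
    vector.foldl (fun keys value =>
        let k := value == "U"
        if keys = [] ∨ keys.getLast? ≠ some k then keys ++ [k] else keys) acc
      = (vector.map (fun v => v == "U")).foldl
          (fun ks k => if ks = [] ∨ ks.getLast? ≠ some k then ks ++ [k] else ks) acc := by
  induction vector with
  | nil => intro acc; rfl
  | cons v rest ih =>
    intro acc
    simp only [List.foldl_cons, List.map_cons]
    exact ih _

-- ===== VERDICT (by name: the statement is the Claim_ definition above) =====
theorem bloques_u_spec : Claim_equal_bloques_u := by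
  unfold Claim_equal_bloques_u
  intro vector _
  unfold Spec_bloques_u bloques_u bloques_u_alt
  have hind : (fun k => if k then (1 : Int) else 0) = pvInd := rfl
  have hb : vector.map (fun value => if value == "U" then (1 : Int) else 0)
      = (vector.map (fun v => v == "U")).map pvInd := by
    rw [List.map_map]; rfl
  have hfold : (vector.foldl (fun keys value =>
        let k := value == "U"
        if keys = [] ∨ keys.getLast? ≠ some k then keys ++ [k] else keys) ([] : List Bool))
      = pvRle none (vector.map (fun v => v == "U")) := by
    rw [pvFoldStr vector [], pvFold_eq_rle]
    rfl
  simp only [hind, hb, hfold, pvAny_map, pvAll_map]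
  generalize (vector.map (fun v => v == "U")) = b
  by_cases h1 : b.any id = true
  · have hbne : b ≠ [] := by rintro rfl; simp at h1
    obtain ⟨c, rest, hcr⟩ := List.exists_cons_of_ne_nil hbne
    by_cases h2 : b.all id = true
    · -- all U: A returns 1, B's key list is [true]
      have hc : c = true := by
        have := List.all_eq_true.1 h2 c (by rw [hcr]; exact List.mem_cons_self)
        simpa using this
      have hrest : ∀ x ∈ rest, x = true := by
        intro x hx
        have := List.all_eq_true.1 h2 x (by rw [hcr]; exact List.mem_cons_of_mem _ hx)
        simpa using this
      have hkeys : pvRle none b = [true] := by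
        rw [hcr, pvRle_cons_ne _ _ _ (by simp), hc, pvRle_eq_nil_of_all rest true hrest]
      rw [h1, h2, hkeys]
      simp [pvInd]
    · -- mixed: A's loop vs B's run count with seam correction
      have h2f : b.all id = false := by cases hh : b.all id <;> simp_all
      have hall : ¬ (∀ x ∈ b, x = true) := fun hfa =>
        h2 (List.all_eq_true.2 (fun x hx => by simpa using hfa x hx))
      have ht : pvRle (some c) rest ≠ [] := by
        intro hnil
        have hrest := pvRle_nil_all rest c hnil
        have hallc : ∀ x ∈ b, x = c := by
          intro x hx
          rw [hcr] at hx
          rcases List.mem_cons.1 hx with rfl | hx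
          · rfl
          · exact hrest x hx
        cases hcc : c with
        | true => exact hall (fun x hx => (hallc x hx).trans hcc)
        | false =>
          obtain ⟨x, hx, hxid⟩ := List.any_eq_true.1 h1
          rw [hallc x hx, hcc] at hxid
          simp at hxid
      have hkeys : pvRle none b = c :: pvRle (some c) rest := by
        rw [hcr, pvRle_cons_ne _ _ _ (by simp)]
      have hlen2 : (pvRle none b).length > 1 := by
        rw [hkeys]
        have := List.length_pos_iff.2 ht
        simp only [List.length_cons]
        omega
      have hhead : (pvRle none b).headD false = c := by rw [hkeys]; rfl
      have hlast : (pvRle none b).getLastD false = b.getLastD false :=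
        pvRle_none_lastD b false
      have hsum : ((pvRle none b).map pvInd).sum = pvRise false b := pvRle_none_trues b
      have hA : (PySem.List.pyRange 0 ((b.map pvInd).length : Int) 1).foldl
          (fun count i =>
            if PySem.List.pyGetD (b.map pvInd) i 0 == 1
              && PySem.List.pyGetD (b.map pvInd) (i - 1) 0 == 0
            then count + 1 else count) 0 = pvRise (b.getLastD false) b := pvA_count b hbne
      rw [h1, h2f]
      rw [if_neg (by simp : ¬ ((!true) = true)), if_neg (by simp : ¬ ((false : Bool) = true))]
      rw [hA]
      simp only [hsum, hhead, hlast]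
      have hseam : pvRise (b.getLastD false) b
          = pvRise false b - (if c && b.getLastD false then 1 else 0) := by
        rw [hcr]
        exact pvRise_seam c rest ((c :: rest).getLastD false)
      rw [hseam]
      by_cases hc : c = true <;> by_cases hp : b.getLastD false = true
      · rw [hc, hp]
        simp [hlen2]
      · have hpf : b.getLastD false = false := by cases hcc : b.getLastD false <;> simp_all
        rw [hc, hpf]
        simp
      · have hcf : c = false := by cases hcc : c <;> simp_all
        rw [hcf, hp]
        simp
      · have hcf : c = false := by cases hcc : c <;> simp_all
        rw [hcf]
        simp
  · -- no U at all: both sides are 0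
    have h1f : b.any id = false := by cases hh : b.any id <;> simp_all
    have hall : ∀ x ∈ b, x = false := by
      intro x hx
      have := List.any_eq_false.1 h1f x hx
      cases x <;> simp_all
    have hhead : (pvRle none b).headD false = false := by
      rw [pvRle_none_headD]
      cases b with
      | nil => rfl
      | cons c rest => exact hall c List.mem_cons_self
    have hsum : ((pvRle none b).map pvInd).sum = 0 := by
      rw [pvRle_none_trues, pvRise_zero b false hall]
    rw [h1f, if_pos (by simp : ((!false) = true))]
    rw [if_neg (by rintro ⟨-, h, -⟩; rw [hhead] at h; exact Bool.false_ne_true h)]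
    exact hsum.symm
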